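-- pv_equiv track=rewrite | github.com/EricBouwers/adventofcode | 2015/19/solve.py | get_new_molecules_backwards
-- ===== SOURCE A (Python) =====
-- def get_new_molecules_backwards(replacements, start):
--     molecules = set()
--
--     for i, c in enumerate(start):
--         seen = start[0:i]
--         to_check = start[i:]
--         for k, rs in replacements.items():
--             for r in rs:
--                 if to_check.startswith(r):
--                     molecules.add(seen + k + to_check[len(r):])
--
--     return molecules
-- ===== SOURCE B (Python) =====
-- def get_new_molecules_backwards(replacements, start):
--     # phase 1: inverted index position -> list of (key, pattern length), built by find-scans
--     occ = {}
--     for k, rs in replacements.items():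
--         for r in rs:
--             i = start.find(r)
--             while i != -1:
--                 occ.setdefault(i, []).append((k, len(r)))
--                 i = start.find(r, i + 1)
--     # phase 2: one pass over positions builds the molecules
--     molecules = set()
--     for i in range(len(start)):
--         for k, lr in occ.get(i, []):
--             molecules.add(start[:i] + k + start[i + lr:])
--     return molecules
-- ===== Notes on version B (the rewrite author's own statement) =====
-- stated objective: alternative
-- what changed: Instead of scanning every position and testing startswith for every pattern there, B runs a find()-based scan per pattern to build an inverted index position -> (key, pattern length) and then assembles the molecule set in one pass over positions.
import Mathlib
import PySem

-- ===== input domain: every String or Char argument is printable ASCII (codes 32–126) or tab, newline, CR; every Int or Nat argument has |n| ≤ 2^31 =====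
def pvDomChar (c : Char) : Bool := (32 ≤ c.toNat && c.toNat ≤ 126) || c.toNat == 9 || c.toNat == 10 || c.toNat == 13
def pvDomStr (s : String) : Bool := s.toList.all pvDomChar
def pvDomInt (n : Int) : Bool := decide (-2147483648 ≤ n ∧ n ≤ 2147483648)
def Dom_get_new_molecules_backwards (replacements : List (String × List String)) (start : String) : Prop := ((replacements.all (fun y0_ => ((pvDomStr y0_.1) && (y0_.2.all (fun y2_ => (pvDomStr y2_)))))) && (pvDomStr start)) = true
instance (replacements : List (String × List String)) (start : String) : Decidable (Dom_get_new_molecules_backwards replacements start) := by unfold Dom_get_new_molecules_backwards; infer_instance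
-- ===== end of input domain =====

-- B replaces A's per-position startswith tests by find()-based scans that build an inverted index
-- position -> (key, pattern length), then one pass over positions builds the set (objective: alternative).

-- ===== PORT A =====
def get_new_molecules_backwards (replacements : List (String × List String)) (start : String) : List String :=
  (PySem.List.enumerate start.toList).foldl (fun molecules ic =>
    replacements.foldl (fun molecules kv =>
      kv.2.foldl (fun molecules r =>
        if PySem.Chars.startswith (PySem.List.slice start.toList (some ic.1) none) r.toList then
          PySem.Set.add molecules (String.ofList
            (PySem.List.slice start.toList (some 0) (some ic.1) ++ kv.1.toList ++
             PySem.List.slice (PySem.List.slice start.toList (some ic.1) none) (some (PySem.Str.len r)) none))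
        else molecules) molecules) molecules) []

-- ===== PORT B =====
-- the while loop 'i = start.find(r); while i != -1: …; i = start.find(r, i+1)'; the scan start
-- strictly increases and find from past the end returns -1, so fuel len+2 never runs out
-- (established by pvLoop_spec below).
def pvFindLoop (s r : List Char) (t : String × Int) (fuel : Nat) (i : Int)
    (occ : PySem.Dict Int (List (String × Int))) : PySem.Dict Int (List (String × Int)) :=
  match fuel with
  | 0 => occ
  | fuel + 1 =>
    if i = -1 then occ
    else pvFindLoop s r t fuel (PySem.Chars.findFrom s r (i + 1))
          (occ.modify i [] (fun l => l ++ [t]))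

def pvBuildOcc (replacements : List (String × List String)) (s : List Char) :
    PySem.Dict Int (List (String × Int)) :=
  replacements.foldl (fun occ kv =>
    kv.2.foldl (fun occ r =>
      pvFindLoop s r.toList (kv.1, PySem.Str.len r) (s.length + 2) (PySem.Chars.find s r.toList) occ)
      occ) PySem.Dict.empty

def get_new_molecules_backwards_alt (replacements : List (String × List String)) (start : String) : List String :=
  let occ := pvBuildOcc replacements start.toList
  (PySem.List.pyRange 0 (start.toList.length : Int)).foldl (fun molecules i =>
    (occ.getD i []).foldl (fun molecules t =>
      PySem.Set.add molecules (String.ofList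
        (PySem.List.slice start.toList none (some i) ++ t.1.toList ++
         PySem.List.slice start.toList (some (i + t.2)) none))) molecules) []

-- ===== PRECONDITION & SPEC =====
def Spec_get_new_molecules_backwards (replacements : List (String × List String)) (start : String) (out : List String) : Prop := out = get_new_molecules_backwards_alt replacements start
instance (replacements : List (String × List String)) (start : String) (out : List String) : Decidable (Spec_get_new_molecules_backwards replacements start out) := by unfold Spec_get_new_molecules_backwards; infer_instance

-- ===== CLAIM (what is proved, stated in full; the proofs are below) =====
def Claim_equal_get_new_molecules_backwards : Prop := ∀ (replacements : List (String × List String)) (start : String), Dom_get_new_molecules_backwards replacements start → Spec_get_new_molecules_backwards replacements start (get_new_molecules_backwards replacements start)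

-- ===== LEMMAS AND PROOFS =====

-- the common value both ports compute: first-occurrence set over matches in (position, pattern) order
def pvBig (replacements : List (String × List String)) (s : List Char) : List String :=
  (List.range s.length).flatMap (fun j =>
    replacements.flatMap (fun kv =>
      (kv.2.filter (fun r => r.toList.isPrefixOf (s.drop j))).map (fun r =>
        String.ofList (s.take j ++ kv.1.toList ++ s.drop (j + r.toList.length)))))

lemma pvFoldIfAdd {α : Type} (l : List α) (p : α → Bool) (f : α → String) (s0 : PySem.Set String) :
    l.foldl (fun s x => if p x then PySem.Set.add s (f x) else s) s0
      = PySem.Set.update s0 ((l.filter p).map f) := by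
  induction l generalizing s0 with
  | nil => simp [PySem.Set.update_nil]
  | cons h t ih => cases hp : p h <;> simp [hp, ih, PySem.Set.update_cons]

lemma pvFoldUpdate {α : Type} (l : List α) (g : α → List String) (s0 : PySem.Set String) :
    l.foldl (fun s x => PySem.Set.update s (g x)) s0 = PySem.Set.update s0 (l.flatMap g) := by
  induction l generalizing s0 with
  | nil => simp [PySem.Set.update_nil]
  | cons h t ih => simp [List.flatMap_cons, ih, PySem.Set.update_append]

lemma pvA_eq (replacements : List (String × List String)) (start : String) :
    get_new_molecules_backwards replacements start
      = PySem.Set.ofList (pvBig replacements start.toList) := by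
  unfold get_new_molecules_backwards
  simp only [pvFoldIfAdd, pvFoldUpdate, PySem.Set.update_nil_left]
  congr 1
  rw [PySem.List.enumerate_eq_map_pyRange start.toList 'a']
  unfold pvBig
  simp [List.flatMap_map, PySem.List.pyRange_zero_natCast, PySem.List.slice_zero_start,
    PySem.List.slice_to_natCast, PySem.List.slice_from_natCast, PySem.Str.len_eq,
    PySem.Chars.startswith, List.drop_drop]

lemma pvFindFrom_past (s sub : List Char) (k : Nat) (hk : s.length < k) :
    PySem.Chars.findFrom s sub (k : Int) = -1 := by
  simp only [PySem.Chars.findFrom]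
  have h1 : ¬ ((k : Int) < 0) := by omega
  norm_num [h1]
  omega

lemma pvLoop_spec (s r : List Char) (t : String × Int) :
    ∀ (fuel pos : Nat) (occ : PySem.Dict Int (List (String × Int))),
      pos ≤ s.length + 1 → s.length + 2 - pos ≤ fuel →
      ∀ j : Nat, j ≤ s.length →
        (pvFindLoop s r t fuel (PySem.Chars.findFrom s r (pos : Int)) occ).getD (j : Int) []
          = occ.getD (j : Int) [] ++ (if pos ≤ j ∧ r <+: s.drop j then [t] else []) := by
  intro fuel
  induction fuel with
  | zero => intro pos occ hpos hfuel; omega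
  | succ f ih =>
    intro pos occ hpos hfuel j hj
    by_cases hpast : s.length < pos
    · have hp1 : pos = s.length + 1 := by omega
      rw [pvFindLoop]
      simp [pvFindFrom_past s r pos hpast]
      omega
    · push Not at hpast
      by_cases hneg : PySem.Chars.findFrom s r (pos : Int) = -1
      · rw [pvFindLoop]
        simp only [hneg, if_pos]
        have hnoinfix := (PySem.Chars.findFrom_natCast_eq_neg_one_iff s r pos hpast).1 hneg
        have : ¬ (pos ≤ j ∧ r <+: s.drop j) := by
          rintro ⟨hpj, hpre⟩
          have hsuf : s.drop j <:+ s.drop pos := by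
            have hdd : (s.drop pos).drop (j - pos) = s.drop j := by
              rw [List.drop_drop]; congr 1; omega
            rw [← hdd]; exact List.drop_suffix _ _
          exact hnoinfix ((List.infix_iff_prefix_suffix).2 ⟨s.drop j, hpre, hsuf⟩)
        simp [this]
      · obtain ⟨hge, hpre, hmin⟩ := PySem.Chars.findFrom_natCast_spec s r pos hpast hneg
        set res := PySem.Chars.findFrom s r (pos : Int) with hres
        have hres0 : (0:Int) ≤ res := le_trans (by omega) hge
        set q := res.toNat with hq
        have hresq : res = (q : Int) := by omega
        have hposq : pos ≤ q := by omega
        have hqn : q ≤ s.length := by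
          by_cases hr : r = []
          · -- minimality: no hit index in [pos, q), and [] is a prefix everywhere, so q = pos
            by_contra hgt
            exact hmin pos le_rfl (by omega) (by simp [hr])
          · have hne : s.drop q ≠ [] := by
              intro hnil; rw [hnil] at hpre; exact hr (List.prefix_nil.1 hpre)
            have := List.drop_eq_nil_iff.not.1 (by simpa using hne)
            omega
        rw [pvFindLoop]
        rw [if_neg hneg]
        have hstep : res + 1 = ((q + 1 : Nat) : Int) := by omega
        rw [hstep, ih (q+1) _ (by omega) (by omega) j hj]
        rw [PySem.Dict.getD_modify]
        by_cases hjq : j = q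
        · subst hjq
          simp [hresq, hpre]
          omega
        · have : ¬ ((j:Int) = res) := by omega
          rw [if_neg this]
          congr 1
          by_cases hhit : r <+: s.drop j
          · by_cases hij : pos ≤ j
            · -- j ≠ q, pos ≤ j, hit: minimality rules out j < q, so q + 1 ≤ j
              have : ¬ j < q := fun hlt => hmin j hij hlt hhit
              have hqj : q + 1 ≤ j := by omega
              simp [hhit, hij, hqj]
            · have : ¬ (q + 1 ≤ j) := by omega
              simp [hij, this]
          · simp [hhit]

lemma pvPass_spec (s r : List Char) (t : String × Int) (occ : PySem.Dict Int (List (String × Int)))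
    (j : Nat) (hj : j ≤ s.length) :
    (pvFindLoop s r t (s.length + 2) (PySem.Chars.find s r) occ).getD (j : Int) []
      = occ.getD (j : Int) [] ++ (if r.isPrefixOf (s.drop j) then [t] else []) := by
  have h := pvLoop_spec s r t (s.length + 2) 0 occ (by omega) (by omega) j hj
  rw [show ((0:Nat):Int) = 0 by norm_num, PySem.Chars.findFrom_zero] at h
  rw [h]
  congr 1
  simp [List.isPrefixOf_iff_prefix]

lemma pvRsFold (s : List Char) (k : String) (rs : List String)
    (occ : PySem.Dict Int (List (String × Int))) (j : Nat) (hj : j ≤ s.length) :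
    (rs.foldl (fun occ r =>
        pvFindLoop s r.toList (k, PySem.Str.len r) (s.length + 2) (PySem.Chars.find s r.toList) occ)
      occ).getD (j : Int) []
      = occ.getD (j : Int) []
        ++ (rs.filter (fun r => r.toList.isPrefixOf (s.drop j))).map (fun r => (k, (r.toList.length : Int))) := by
  induction rs generalizing occ with
  | nil => simp
  | cons r rs ih =>
    simp only [List.foldl_cons, List.filter_cons]
    rw [ih, pvPass_spec s r.toList _ occ j hj]
    by_cases hp : r.toList.isPrefixOf (s.drop j) <;> simp [hp, PySem.Str.len_eq]

lemma pvBuildOcc_getD (replacements : List (String × List String)) (s : List Char)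
    (j : Nat) (hj : j ≤ s.length) :
    (pvBuildOcc replacements s).getD (j : Int) []
      = replacements.flatMap (fun kv =>
          (kv.2.filter (fun r => r.toList.isPrefixOf (s.drop j))).map (fun r =>
            (kv.1, (r.toList.length : Int)))) := by
  unfold pvBuildOcc
  suffices h : ∀ occ : PySem.Dict Int (List (String × Int)),
      (replacements.foldl (fun occ kv =>
        kv.2.foldl (fun occ r =>
          pvFindLoop s r.toList (kv.1, PySem.Str.len r) (s.length + 2) (PySem.Chars.find s r.toList) occ)
        occ) occ).getD (j : Int) []
      = occ.getD (j : Int) []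
        ++ replacements.flatMap (fun kv =>
            (kv.2.filter (fun r => r.toList.isPrefixOf (s.drop j))).map (fun r =>
              (kv.1, (r.toList.length : Int)))) by
    rw [h PySem.Dict.empty]; simp
  induction replacements with
  | nil => simp
  | cons kv rest ih =>
    intro occ
    simp only [List.foldl_cons, List.flatMap_cons]
    rw [ih, pvRsFold s kv.1 kv.2 occ j hj, List.append_assoc]

lemma pvB_eq (replacements : List (String × List String)) (start : String) :
    get_new_molecules_backwards_alt replacements start
      = PySem.Set.ofList (pvBig replacements start.toList) := by
  unfold get_new_molecules_backwards_alt
  simp only [← PySem.Set.update_map_eq_foldl_add, pvFoldUpdate, PySem.Set.update_nil_left]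
  congr 1
  unfold pvBig
  rw [PySem.List.pyRange_zero_natCast, List.flatMap_map]
  apply List.flatMap_congr
  intro j hj
  have hjn : j ≤ start.toList.length := le_of_lt (List.mem_range.1 hj)
  rw [pvBuildOcc_getD replacements start.toList j hjn]
  rw [List.map_flatMap]
  apply List.flatMap_congr
  intro kv _
  rw [List.map_map]
  apply List.map_congr_left
  intro r _
  simp only [Function.comp_apply]
  rw [show ((j:Int) + (r.toList.length : Int)) = ((j + r.toList.length : Nat) : Int) by push_cast; ring,
    PySem.List.slice_from_natCast]
  simp [PySem.List.slice_to_natCast]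

-- ===== VERDICT (by name: the statement is the Claim_ definition above) =====
theorem get_new_molecules_backwards_spec : Claim_equal_get_new_molecules_backwards := by
  intro replacements start _
  unfold Spec_get_new_molecules_backwards
  rw [pvA_eq, pvB_eq]
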